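-- pv_equiv track=rewrite | github.com/Kamil-IT/WstepDOProgramowaniaPython | Python(Algorithmics)/list6/ex1.py | hamming_include_near_letters
-- ===== SOURCE A (Python) =====
-- def hamming(text1, text2):
--     count_difference = 0
--     if len(text1) < len(text2):
--         count_difference += len(text2) - len(text1)
--
--     for i in range(len(text1)):
--         if i >= len(text2):
--             count_difference += len(text1) - len(text2)
--             break
--         if text1[i] != text2[i]:
--             count_difference += 1
--     return count_difference
--
-- def near_letters(row, char, char2):
--     if char not in row or char2 not in row:
--         return 0
--
--     index = row.index(char)
--
--     if row[index - 1] == char2 or row[index + 1] == char2: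
--         return 1
--
--     return 0
--
-- def hamming_include_near_letters(text1, text2):
--     keyboard_row1 = ['q', 'w', 'e', 'r', 't', 'y', 'u', 'w', 'i', 'o', 'p']
--     keyboard_row2 = ['a', 's', 'd', 'f', 'g', 'h', 'j', 'k', 'l']
--     keyboard_row3 = ['z', 'x', 'c', 'v', 'b', 'n', 'm']
--
--     count_difference = hamming(text1, text2)
--
--     for i in range(len(text1)):
--         if i >= len(text2):
--             break
--         if text1[i] != text2[i]:
--             count_difference += near_letters(keyboard_row1, text1[i], text2[i]) + \
--                                 near_letters(keyboard_row2, text1[i], text2[i]) + \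
--                                 near_letters(keyboard_row3, text1[i], text2[i])
--
--     return count_difference
-- ===== SOURCE B (Python) =====
-- KEYBOARD_ROWS = ["qwertyuiop", "asdfghjkl", "zxcvbnm"]
--
--
-- def hamming_include_near_letters(text1, text2):
--     total = abs(len(text1) - len(text2))
--     for a, b in zip(text1, text2):
--         if a != b:
--             total += 1
--             if any(a + b in row or b + a in row for row in KEYBOARD_ROWS):
--                 total += 1
--     return total
-- ===== Notes on version B (the rewrite author's own statement) =====
-- stated objective: simpler
-- what changed: B is one fused pass over the zipped strings with the absolute length difference added upfront, scoring the keyboard bonus by a two-character substring test (a+b or b+a in a QWERTY row string) instead of A's two separate index loops calling near_letters with three per-mismatch row scans and index arithmetic; Pre_ excludes the inputs on which A's near_letters raises IndexError.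
-- intended difference: On inputs whose aligned mismatched pairs hit A's quirk pairs unequally often - (q,p),(a,l),(z,m) bonused by near_letters' negative-index wraparound joining the ends of a row, and (u,w),(i,w) bonused but (u,i),(i,u) missed because A's top row has a stray extra 'w' - A's count differs from B's by exactly that imbalance; B scores true QWERTY adjacency, the intended bonus. — e.g. on hamming_include_near_letters("q", "p"): A returns 2, B returns 1
import Mathlib
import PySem

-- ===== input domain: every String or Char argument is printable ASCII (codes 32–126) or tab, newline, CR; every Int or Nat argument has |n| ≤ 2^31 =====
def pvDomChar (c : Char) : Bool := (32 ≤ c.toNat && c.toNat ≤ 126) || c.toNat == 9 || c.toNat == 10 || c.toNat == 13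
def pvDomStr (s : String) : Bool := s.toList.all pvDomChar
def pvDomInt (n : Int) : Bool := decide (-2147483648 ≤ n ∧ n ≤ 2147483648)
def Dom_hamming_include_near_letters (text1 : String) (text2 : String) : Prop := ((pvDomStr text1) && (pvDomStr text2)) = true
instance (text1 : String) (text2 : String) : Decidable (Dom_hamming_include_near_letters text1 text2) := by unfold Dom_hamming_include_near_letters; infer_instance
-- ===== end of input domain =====

-- B is a single fused pass over the zipped strings scoring the bonus by a two-character
-- substring test against the QWERTY rows (objective: simpler); return-value equivalence only.

-- ===== PORT A =====
def pvRow1 : List Char := ['q','w','e','r','t','y','u','w','i','o','p']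
def pvRow2 : List Char := ['a','s','d','f','g','h','j','k','l']
def pvRow3 : List Char := ['z','x','c','v','b','n','m']

-- near_letters; where Python raises IndexError (row[index+1] past the end with the
-- left neighbour test false) pyGet? is none and the `.getD ' '` default is taken:
-- those inputs are excluded by Pre_, elsewhere this is exact.
def nearLettersA (row : List Char) (ch ch2 : Char) : Int :=
  if (¬ ch ∈ row) ∨ (¬ ch2 ∈ row) then 0
  else
    let index : Nat := (PySem.List.index? row ch).getD 0
    if (PySem.List.pyGet? row ((index : Int) - 1)).getD ' ' = ch2 ∨
       (PySem.List.pyGet? row ((index : Int) + 1)).getD ' ' = ch2 then 1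
    else 0

-- the loop of `hamming` (for i in range(len(text1)) with the break)
def hamLoopA (t1 t2 : List Char) (i : Nat) (c : Int) : Int :=
  if i < t1.length then
    if t2.length ≤ i then c + ((t1.length : Int) - (t2.length : Int))
    else hamLoopA t1 t2 (i + 1) (if t1.getD i ' ' ≠ t2.getD i ' ' then c + 1 else c)
  else c
termination_by t1.length - i

def hammingA (t1 t2 : List Char) : Int :=
  hamLoopA t1 t2 0 (if t1.length < t2.length then (t2.length : Int) - (t1.length : Int) else 0)

-- the second loop of hamming_include_near_letters
def bonLoopA (t1 t2 : List Char) (i : Nat) (c : Int) : Int :=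
  if i < t1.length then
    if t2.length ≤ i then c
    else bonLoopA t1 t2 (i + 1)
      (if t1.getD i ' ' ≠ t2.getD i ' ' then
        c + (nearLettersA pvRow1 (t1.getD i ' ') (t2.getD i ' ') +
             nearLettersA pvRow2 (t1.getD i ' ') (t2.getD i ' ') +
             nearLettersA pvRow3 (t1.getD i ' ') (t2.getD i ' '))
       else c)
  else c
termination_by t1.length - i

def hamming_include_near_letters (text1 : String) (text2 : String) : Int :=
  bonLoopA text1.toList text2.toList 0 (hammingA text1.toList text2.toList)

-- ===== PORT B =====
-- the KEYBOARD_ROWS string constants, as char lists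
def altRows : List (List Char) :=
  [['q','w','e','r','t','y','u','i','o','p'],
   ['a','s','d','f','g','h','j','k','l'],
   ['z','x','c','v','b','n','m']]

-- Python `a + b in row` (two-char substring test) is PySem.Chars.isIn.
def altStep (tot : Int) (p : Char × Char) : Int :=
  if p.1 ≠ p.2 then
    let t := tot + 1
    if altRows.any (fun row => PySem.Chars.isIn [p.1, p.2] row || PySem.Chars.isIn [p.2, p.1] row)
    then t + 1 else t
  else tot

def hamming_include_near_letters_alt (text1 : String) (text2 : String) : Int :=
  (text1.toList.zip text2.toList).foldl altStep
    (|(PySem.List.len text1.toList) - (PySem.List.len text2.toList)|)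

-- ===== PRECONDITION & SPEC =====
-- a mismatched pair (a, b) on which A's near_letters raises IndexError: a is the last
-- letter of its keyboard row, b is in the same row and is not a's left neighbour
def pvRaisePair (a b : Char) : Bool :=
  (a == 'p' && ['q','w','e','r','t','y','u','w','i','o','p'].contains b && b != 'o') ||
  (a == 'l' && ['a','s','d','f','g','h','j','k','l'].contains b && b != 'k') ||
  (a == 'm' && ['z','x','c','v','b','n','m'].contains b && b != 'n')

-- Pre_ excludes exactly the inputs on which A raises IndexError (see pvRaisePair)
def Pre_hamming_include_near_letters (text1 : String) (text2 : String) : Prop :=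
  ∀ p ∈ text1.toList.zip text2.toList, p.1 ≠ p.2 → pvRaisePair p.1 p.2 = false
instance (text1 : String) (text2 : String) : Decidable (Pre_hamming_include_near_letters text1 text2) := by
  unfold Pre_hamming_include_near_letters; infer_instance

def pvWitness_hamming_include_near_letters : String × String := ("hello", "help!")

-- aligned pairs where A awards a bonus but true QWERTY adjacency gives none:
-- (q,p),(a,l),(z,m) via near_letters' negative-index wraparound at a row start,
-- (u,w),(i,w) via the stray extra 'w' in A's top row
def pvPairP (p : Char × Char) : Bool :=
  [('q','p'), ('a','l'), ('z','m'), ('u','w'), ('i','w')].contains p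
-- aligned pairs where true QWERTY adjacency gives a bonus but A (stray 'w') gives none
def pvPairN (p : Char × Char) : Bool :=
  [('u','i'), ('i','u')].contains p

-- On inputs whose aligned mismatched pairs hit A's quirk pairs unequally often —
-- (q,p),(a,l),(z,m) bonused by near_letters' negative-index wraparound joining row ends,
-- (u,w),(i,w) bonused and (u,i),(i,u) missed because A's top row has a stray 'w' —
-- A's count differs from B's by exactly that imbalance; B scores the true QWERTY
-- adjacency, the intended bonus.
def pvQuirkCount (f : Char × Char → Bool) (s t : String) : Nat :=
  List.countP f (s.toList.zip t.toList)

def D_hamming_include_near_letters (text1 : String) (text2 : String) : Prop :=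
  pvQuirkCount pvPairP text1 text2 ≠ pvQuirkCount pvPairN text1 text2
instance (text1 : String) (text2 : String) : Decidable (D_hamming_include_near_letters text1 text2) := by
  unfold D_hamming_include_near_letters; infer_instance

def Spec_hamming_include_near_letters (text1 : String) (text2 : String) (out : Int) : Prop :=
  ¬ D_hamming_include_near_letters text1 text2 → out = hamming_include_near_letters_alt text1 text2
instance (text1 : String) (text2 : String) (out : Int) : Decidable (Spec_hamming_include_near_letters text1 text2 out) := by
  unfold Spec_hamming_include_near_letters; infer_instance

def pvDiffWitness_hamming_include_near_letters : String × String := ("q", "p")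
def pvDiffWitnessOut_hamming_include_near_letters : Int × Int := (2, 1)

-- ===== CLAIM (what is proved, stated in full; the proofs are below) =====
def Claim_unchanged_hamming_include_near_letters : Prop := ∀ (text1 : String) (text2 : String), Dom_hamming_include_near_letters text1 text2 → Pre_hamming_include_near_letters text1 text2 → Spec_hamming_include_near_letters text1 text2 (hamming_include_near_letters text1 text2)
def Claim_changed_hamming_include_near_letters : Prop := Dom_hamming_include_near_letters (pvDiffWitness_hamming_include_near_letters.1) (pvDiffWitness_hamming_include_near_letters.2) ∧ Pre_hamming_include_near_letters (pvDiffWitness_hamming_include_near_letters.1) (pvDiffWitness_hamming_include_near_letters.2) ∧ D_hamming_include_near_letters (pvDiffWitness_hamming_include_near_letters.1) (pvDiffWitness_hamming_include_near_letters.2) ∧ hamming_include_near_letters (pvDiffWitness_hamming_include_near_letters.1) (pvDiffWitness_hamming_include_near_letters.2) = pvDiffWitnessOut_hamming_include_near_letters.1 ∧ hamming_include_near_letters_alt (pvDiffWitness_hamming_include_near_letters.1) (pvDiffWitness_hamming_include_near_letters.2) = pvDiffWitnessOut_hamming_include_near_letters.2 ∧ pvDiffWitnessOut_hamming_include_near_letters.1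 ≠ pvDiffWitnessOut_hamming_include_near_letters.2
def Claim_exact_hamming_include_near_letters : Prop := ∀ (text1 : String) (text2 : String), Dom_hamming_include_near_letters text1 text2 → Pre_hamming_include_near_letters text1 text2 → D_hamming_include_near_letters text1 text2 → hamming_include_near_letters text1 text2 ≠ hamming_include_near_letters_alt text1 text2
-- ===== LEMMAS AND PROOFS =====

def pvLetters : List Char := pvRow1 ++ pvRow2 ++ pvRow3

def nearSumA (a b : Char) : Int :=
  nearLettersA pvRow1 a b + nearLettersA pvRow2 a b + nearLettersA pvRow3 a b

def bBonus (a b : Char) : Int :=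
  if altRows.any (fun row => PySem.Chars.isIn [a, b] row || PySem.Chars.isIn [b, a] row) then 1 else 0

def mismP (p : Char × Char) : Int := if p.1 ≠ p.2 then 1 else 0
def bonP (p : Char × Char) : Int := if p.1 ≠ p.2 then nearSumA p.1 p.2 else 0
def contribB (p : Char × Char) : Int := if p.1 ≠ p.2 then 1 + bBonus p.1 p.2 else 0

lemma mem_of_isIn {a b : Char} {row : List Char}
    (h : PySem.Chars.isIn [a, b] row = true) : a ∈ row ∧ b ∈ row := by
  have h' : [a, b] <:+: row := (PySem.Chars.isIn_iff_infix _ _).mp h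
  exact ⟨h'.subset (by simp), h'.subset (by simp)⟩

lemma altRows_sub : (altRows.all fun row => row.all fun c => pvLetters.contains c) = true := by
  decide

lemma mem_pvLetters_of_mem_row {c : Char} {row : List Char} (hrow : row ∈ altRows)
    (hc : c ∈ row) : c ∈ pvLetters := by
  have h1 := (List.all_eq_true.mp (List.all_eq_true.mp altRows_sub row hrow)) c hc
  simpa using h1

lemma bBonus_zero_left {a : Char} (b : Char) (ha : a ∉ pvLetters) : bBonus a b = 0 := by
  unfold bBonus
  rw [if_neg]
  intro h
  rw [List.any_eq_true] at h
  obtain ⟨row, hrow, h⟩ := h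
  rw [Bool.or_eq_true] at h
  rcases h with h | h
  · exact ha (mem_pvLetters_of_mem_row hrow (mem_of_isIn h).1)
  · exact ha (mem_pvLetters_of_mem_row hrow (mem_of_isIn h).2)

lemma bBonus_zero_right (a : Char) {b : Char} (hb : b ∉ pvLetters) : bBonus a b = 0 := by
  unfold bBonus
  rw [if_neg]
  intro h
  rw [List.any_eq_true] at h
  obtain ⟨row, hrow, h⟩ := h
  rw [Bool.or_eq_true] at h
  rcases h with h | h
  · exact hb (mem_pvLetters_of_mem_row hrow (mem_of_isIn h).2)
  · exact hb (mem_pvLetters_of_mem_row hrow (mem_of_isIn h).1)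

lemma pvPairP_shape {p : Char × Char} (h : pvPairP p = true) :
    p = ('q','p') ∨ p = ('a','l') ∨ p = ('z','m') ∨ p = ('u','w') ∨ p = ('i','w') := by
  have hm : p ∈ [('q','p'), ('a','l'), ('z','m'), ('u','w'), ('i','w')] := by
    simpa [pvPairP] using h
  simpa using hm

lemma pvPairN_shape {p : Char × Char} (h : pvPairN p = true) :
    p = ('u','i') ∨ p = ('i','u') := by
  have hm : p ∈ [('u','i'), ('i','u')] := by simpa [pvPairN] using h
  simpa using hm

lemma pvPairP_ne {p : Char × Char} (h : pvPairP p = true) : p.1 ≠ p.2 := by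
  rcases pvPairP_shape h with h1 | h1 | h1 | h1 | h1 <;> rw [h1] <;> decide

lemma pvPairN_ne {p : Char × Char} (h : pvPairN p = true) : p.1 ≠ p.2 := by
  rcases pvPairN_shape h with h1 | h1 <;> rw [h1] <;> decide

lemma pvPairP_mem {p : Char × Char} (h : pvPairP p = true) : p.1 ∈ pvLetters ∧ p.2 ∈ pvLetters := by
  rcases pvPairP_shape h with h1 | h1 | h1 | h1 | h1 <;> rw [h1] <;> exact ⟨by decide, by decide⟩

lemma pvPairN_mem {p : Char × Char} (h : pvPairN p = true) : p.1 ∈ pvLetters ∧ p.2 ∈ pvLetters := by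
  rcases pvPairN_shape h with h1 | h1 <;> rw [h1] <;> exact ⟨by decide, by decide⟩

-- pointwise: on a mismatched non-raising pair, A's bonus = B's bonus + P − N
set_option maxRecDepth 8192 in
lemma nearSumA_eq (a b : Char) (hne : a ≠ b) (hr : pvRaisePair a b = false) :
    nearSumA a b = bBonus a b + (if pvPairP (a, b) then (1 : Int) else 0)
      - (if pvPairN (a, b) then (1 : Int) else 0) := by
  by_cases ha : a ∈ pvLetters
  · by_cases hb : b ∈ pvLetters
    · have hall : (pvLetters.all fun x => pvLetters.all fun y =>
          (x == y) || pvRaisePair x y ||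
          (nearSumA x y == bBonus x y + (if pvPairP (x, y) then (1 : Int) else 0)
            - (if pvPairN (x, y) then (1 : Int) else 0))) = true := by decide
      have h2 := (List.all_eq_true.mp ((List.all_eq_true.mp hall) a ha)) b hb
      simpa [hne, hr] using h2
    · have h1 : b ∉ pvRow1 := fun h => hb (by simp [pvLetters, h])
      have h2 : b ∉ pvRow2 := fun h => hb (by simp [pvLetters, h])
      have h3 : b ∉ pvRow3 := fun h => hb (by simp [pvLetters, h])
      have hP : pvPairP (a, b) = false :=
        Bool.eq_false_iff.mpr (fun h => hb (pvPairP_mem h).2)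
      have hN : pvPairN (a, b) = false :=
        Bool.eq_false_iff.mpr (fun h => hb (pvPairN_mem h).2)
      simp [nearSumA, nearLettersA, h1, h2, h3, bBonus_zero_right a hb, hP, hN]
  · have h1 : a ∉ pvRow1 := fun h => ha (by simp [pvLetters, h])
    have h2 : a ∉ pvRow2 := fun h => ha (by simp [pvLetters, h])
    have h3 : a ∉ pvRow3 := fun h => ha (by simp [pvLetters, h])
    have hP : pvPairP (a, b) = false :=
      Bool.eq_false_iff.mpr (fun h => ha (pvPairP_mem h).1)
    have hN : pvPairN (a, b) = false :=
      Bool.eq_false_iff.mpr (fun h => ha (pvPairN_mem h).1)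
    simp [nearSumA, nearLettersA, h1, h2, h3, bBonus_zero_left b ha, hP, hN]

lemma hamLoopA_eq (t1 t2 : List Char) : ∀ (n i : Nat) (c : Int), t1.length - i = n →
    i ≤ min t1.length t2.length →
    hamLoopA t1 t2 i c = c + (((t1.zip t2).drop i).map mismP).sum +
      (if t2.length < t1.length then (t1.length : Int) - (t2.length : Int) else 0) := by
  intro n
  induction n with
  | zero =>
    intro i c hn hi
    have hdrop : (t1.zip t2).drop i = [] :=
      List.drop_eq_nil_of_le (by simp [List.length_zip]; omega)
    have hnl : ¬ t2.length < t1.length := by omega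
    rw [hamLoopA, if_neg (by omega)]
    simp [hdrop, hnl]
  | succ n ih =>
    intro i c hn hi
    have hi1 : i < t1.length := by omega
    rw [hamLoopA, if_pos hi1]
    by_cases h2 : t2.length ≤ i
    · rw [if_pos h2]
      have hdrop : (t1.zip t2).drop i = [] :=
        List.drop_eq_nil_of_le (by simp [List.length_zip]; omega)
      have hlt : t2.length < t1.length := by omega
      simp [hdrop, hlt]
    · rw [if_neg h2]
      have h2' : i < t2.length := by omega
      rw [ih (i + 1) _ (by omega) (by omega)]
      have hzl : i < (t1.zip t2).length := by simp [List.length_zip]; omega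
      rw [List.drop_eq_getElem_cons hzl]
      simp only [List.map_cons, List.sum_cons, List.getElem_zip, mismP,
        List.getD_eq_getElem t1 ' ' hi1, List.getD_eq_getElem t2 ' ' h2']
      split_ifs <;> ring

lemma bonLoopA_eq (t1 t2 : List Char) : ∀ (n i : Nat) (c : Int), t1.length - i = n →
    i ≤ min t1.length t2.length →
    bonLoopA t1 t2 i c = c + (((t1.zip t2).drop i).map bonP).sum := by
  intro n
  induction n with
  | zero =>
    intro i c hn hi
    have hdrop : (t1.zip t2).drop i = [] :=
      List.drop_eq_nil_of_le (by simp [List.length_zip]; omega)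
    rw [bonLoopA, if_neg (by omega)]
    simp [hdrop]
  | succ n ih =>
    intro i c hn hi
    have hi1 : i < t1.length := by omega
    rw [bonLoopA, if_pos hi1]
    by_cases h2 : t2.length ≤ i
    · rw [if_pos h2]
      have hdrop : (t1.zip t2).drop i = [] :=
        List.drop_eq_nil_of_le (by simp [List.length_zip]; omega)
      simp [hdrop]
    · rw [if_neg h2]
      have h2' : i < t2.length := by omega
      rw [ih (i + 1) _ (by omega) (by omega)]
      have hzl : i < (t1.zip t2).length := by simp [List.length_zip]; omega
      rw [List.drop_eq_getElem_cons hzl]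
      simp only [List.map_cons, List.sum_cons, List.getElem_zip, bonP, nearSumA,
        List.getD_eq_getElem t1 ' ' hi1, List.getD_eq_getElem t2 ' ' h2']
      split_ifs <;> ring

lemma altStep_eq (c : Int) (p : Char × Char) : altStep c p = c + contribB p := by
  unfold altStep contribB bBonus
  by_cases h : p.1 = p.2
  · simp [h]
  · simp only [if_pos h]
    split_ifs <;> simp [h] <;> ring

lemma foldl_altStep_eq (l : List (Char × Char)) : ∀ c : Int,
    l.foldl altStep c = c + (l.map contribB).sum := by
  induction l with
  | nil => intro c; simp
  | cons p l ih =>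
    intro c
    rw [List.foldl_cons, ih, altStep_eq]
    simp; ring

def pInd (p : Char × Char) : Int := if pvPairP p then 1 else 0
def nInd (p : Char × Char) : Int := if pvPairN p then 1 else 0

lemma countP_int_eq (f : Char × Char → Bool) (l : List (Char × Char)) :
    ((l.countP f : Nat) : Int) = (l.map (fun p => if f p then (1 : Int) else 0)).sum := by
  induction l with
  | nil => simp
  | cons q l ih =>
    rw [List.countP_cons, List.map_cons, List.sum_cons]
    by_cases h : f q = true <;> simp [h, ih] <;> ring

lemma sum_split (l : List (Char × Char))
    (hall : ∀ p ∈ l, contribB p + pInd p - nInd p = mismP p + bonP p) :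
    (l.map contribB).sum + (l.map pInd).sum - (l.map nInd).sum =
      (l.map mismP).sum + (l.map bonP).sum := by
  induction l with
  | nil => simp
  | cons q l ih =>
    have hq := hall q (by simp)
    have hl := ih (fun p hp => hall p (by simp [hp]))
    simp only [List.map_cons, List.sum_cons]
    omega

-- A = B + countP pvPairP − countP pvPairN, wherever A returns (Pre_)
lemma pv_master (text1 text2 : String)
    (hpre : Pre_hamming_include_near_letters text1 text2) :
    hamming_include_near_letters text1 text2 =
      hamming_include_near_letters_alt text1 text2 +
      ((text1.toList.zip text2.toList).countP pvPairP : Int) -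
      ((text1.toList.zip text2.toList).countP pvPairN : Int) := by
  unfold hamming_include_near_letters hamming_include_near_letters_alt hammingA
  set t1 := text1.toList
  set t2 := text2.toList
  rw [bonLoopA_eq t1 t2 t1.length 0 _ (by omega) (by omega),
      hamLoopA_eq t1 t2 t1.length 0 _ (by omega) (by omega),
      foldl_altStep_eq]
  simp only [List.drop_zero, PySem.List.len_eq]
  have hmap : ∀ p ∈ t1.zip t2, contribB p + pInd p - nInd p = mismP p + bonP p := by
    intro p hp
    by_cases hpq : p.1 = p.2
    · have hP : pvPairP p = false := Bool.eq_false_iff.mpr (fun h => (pvPairP_ne h) hpq)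
      have hN : pvPairN p = false := Bool.eq_false_iff.mpr (fun h => (pvPairN_ne h) hpq)
      simp [contribB, mismP, bonP, pInd, nInd, hpq, hP, hN]
    · have hr := hpre p hp hpq
      have hns := nearSumA_eq p.1 p.2 hpq hr
      simp only [contribB, mismP, bonP, pInd, nInd, if_pos hpq, hns]
      ring
  have hS := sum_split (t1.zip t2) hmap
  rw [countP_int_eq pvPairP, countP_int_eq pvPairN]
  have hpi : (t1.zip t2).map (fun p => if pvPairP p then (1 : Int) else 0) = (t1.zip t2).map pInd := rfl
  have hni : (t1.zip t2).map (fun p => if pvPairN p then (1 : Int) else 0) = (t1.zip t2).map nInd := rfl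
  rw [hpi, hni]
  have habs : |(t1.length : Int) - (t2.length : Int)| =
      (if t1.length < t2.length then (t2.length : Int) - (t1.length : Int) else 0) +
      (if t2.length < t1.length then (t1.length : Int) - (t2.length : Int) else 0) := by
    split_ifs with h1 h2 h2
    · exact absurd h2 (by omega)
    · rw [abs_of_nonpos (by omega)]; ring
    · rw [abs_of_nonneg (by omega)]; ring
    · have h0 : ((t1.length : Int) - (t2.length : Int)) = 0 := by omega
      rw [h0]; simp
  rw [habs]
  omega

-- ===== VERDICT (by name: the statements are the Claim_ definitions above) =====
theorem hamming_include_near_letters_spec : Claim_unchanged_hamming_include_near_letters := by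
  intro text1 text2 _ hpre
  unfold Spec_hamming_include_near_letters
  intro hnd
  unfold D_hamming_include_near_letters pvQuirkCount at hnd
  have h := pv_master text1 text2 hpre
  omega

theorem hamming_include_near_letters_changed : Claim_changed_hamming_include_near_letters := by
  unfold Claim_changed_hamming_include_near_letters
  have hpre : Pre_hamming_include_near_letters "q" "p" := by decide
  have halt : hamming_include_near_letters_alt "q" "p" = 1 := by decide
  have hA : hamming_include_near_letters "q" "p" = 2 := by
    rw [pv_master "q" "p" hpre, halt]
    decide
  exact ⟨by decide, hpre, by decide, hA, halt, by decide⟩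

theorem hamming_include_near_letters_tight : Claim_exact_hamming_include_near_letters := by
  intro text1 text2 _ hpre hd
  unfold D_hamming_include_near_letters pvQuirkCount at hd
  have h := pv_master text1 text2 hpre
  omega
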